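-- pv_equiv track=rewrite | github.com/pypi-data/pypi-mirror-369 | packages/flow-compute/flow_compute-0.1.0-py3-none-any.whl/flow/cli/utils/mount_parser.py | validate_mounts
-- ===== SOURCE A (Python) =====
-- def validate_mounts(mounts: dict[str, str]) -> list[str]:
--     """Validate mount configuration.
--
--     Args:
--         mounts: Dictionary of target:source mappings
--
--     Returns:
--         List of validation warnings (empty if all valid)
--     """
--     warnings = []
--
--     for target, source in mounts.items():
--         # Check for overlapping mount points
--         for other_target in mounts:
--             if target != other_target and target.startswith(other_target + "/"):
--                 warnings.append(f"Mount target '{target}' is inside '{other_target}'")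
--
--         # Warn about common system directories
--         system_dirs = ["/bin", "/etc", "/proc", "/sys", "/dev", "/tmp"]
--         if any(target.startswith(d) for d in system_dirs):
--             warnings.append(f"Mount target '{target}' overlaps with system directory")
--
--     return warnings
-- ===== SOURCE B (Python) =====
-- def validate_mounts(mounts: dict[str, str]) -> list[str]:
--     """Validate mount configuration.
--
--     Instead of comparing every target against every other target with
--     startswith, index targets in a dict, enumerate each target's
--     path-ancestor prefixes (the text before each '/'), look each one up,
--     and sort the matches by the ancestor's insertion position.
--     """
--     system_dirs = ("/bin", "/etc", "/proc", "/sys", "/dev", "/tmp")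
--     index = {target: i for i, target in enumerate(mounts)}
--     warnings = []
--     for target in mounts:
--         hits = []
--         for pos, ch in enumerate(target):
--             if ch == "/":
--                 ancestor = target[:pos]
--                 i = index.get(ancestor)
--                 if i is not None:
--                     hits.append((i, ancestor))
--         hits.sort(key=lambda h: h[0])
--         for _, ancestor in hits:
--             warnings.append(f"Mount target '{target}' is inside '{ancestor}'")
--         if target.startswith(system_dirs):
--             warnings.append(f"Mount target '{target}' overlaps with system directory")
--     return warnings
-- ===== Notes on version B (the rewrite author's own statement) =====
-- stated objective: faster
-- what changed: Instead of testing every target against every other target with startswith (quadratic in the number of mounts), B builds a dict from target to insertion index once, then for each target enumerates its path-ancestor prefixes (the text before each '/'), looks each up in the dict, and sorts the hits by insertion index to reproduce A's warning order.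
import Mathlib
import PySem

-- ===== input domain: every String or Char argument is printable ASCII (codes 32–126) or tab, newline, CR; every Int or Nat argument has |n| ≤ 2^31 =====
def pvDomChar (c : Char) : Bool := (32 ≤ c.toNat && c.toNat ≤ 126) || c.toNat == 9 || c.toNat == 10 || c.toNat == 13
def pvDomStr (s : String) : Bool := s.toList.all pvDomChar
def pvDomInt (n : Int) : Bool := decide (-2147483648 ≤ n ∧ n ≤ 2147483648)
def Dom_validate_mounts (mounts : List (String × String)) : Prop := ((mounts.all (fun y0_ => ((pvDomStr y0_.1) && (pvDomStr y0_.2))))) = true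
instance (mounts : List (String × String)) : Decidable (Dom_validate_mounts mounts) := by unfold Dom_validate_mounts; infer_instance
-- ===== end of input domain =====

-- B replaces A's all-pairs startswith scan by a dict of targets consulted for each target's
-- path-ancestor prefixes, sorting the hits by insertion index (objective: faster; measured).
-- `mounts` models the Python dict: iteration is over its keys (first occurrence wins).

-- ===== PORT A =====
def pvMsgInside (target other : String) : String :=
  "Mount target '" ++ target ++ "' is inside '" ++ other ++ "'"
def pvMsgSys (target : String) : String :=
  "Mount target '" ++ target ++ "' overlaps with system directory"
def pvSystemDirs : List String := ["/bin", "/etc", "/proc", "/sys", "/dev", "/tmp"]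

def validate_mounts (mounts : List (String × String)) : List String :=
  -- the Python receives a dict: its keys are the distinct targets in first-insertion order
  let keys : PySem.Set String := PySem.Set.ofList (mounts.map Prod.fst)
  keys.foldl (fun warnings target =>
    let warnings := keys.foldl (fun w other =>
      if target != other && PySem.Str.startswith target (other ++ "/") then
        w ++ [pvMsgInside target other]
      else w) warnings
    if pvSystemDirs.any (fun d => PySem.Str.startswith target d) then
      warnings ++ [pvMsgSys target]
    else warnings) []

-- ===== PORT B =====
def validate_mounts_alt (mounts : List (String × String)) : List String :=
  let keys : PySem.Set String := PySem.Set.ofList (mounts.map Prod.fst)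
  -- index = {target: i for i, target in enumerate(mounts)}
  let index : PySem.Dict String Int :=
    (PySem.List.enumerate keys).foldl (fun d p => d.insert p.2 p.1) PySem.Dict.empty
  keys.foldl (fun warnings target =>
    let hits := (PySem.List.enumerate target.toList).foldl (fun h p =>
      if p.2 == '/' then
        match index.get? (PySem.Str.slice target none (some p.1)) with
        | some i => h ++ [(i, PySem.Str.slice target none (some p.1))]
        | none => h
      else h) []
    let hits := PySem.List.sorted hits (fun h => h.1)
    let warnings := hits.foldl (fun w h => w ++ [pvMsgInside target h.2]) warnings
    if pvSystemDirs.any (fun d => PySem.Str.startswith target d) then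
      warnings ++ [pvMsgSys target]
    else warnings) []

-- ===== PRECONDITION & SPEC =====
def Spec_validate_mounts (mounts : List (String × String)) (out : List String) : Prop := out = validate_mounts_alt mounts
instance (mounts : List (String × String)) (out : List String) : Decidable (Spec_validate_mounts mounts out) := by unfold Spec_validate_mounts; infer_instance

-- ===== CLAIM (what is proved, stated in full; the proofs are below) =====
def Claim_equal_validate_mounts : Prop := ∀ (mounts : List (String × String)), Dom_validate_mounts mounts → Spec_validate_mounts mounts (validate_mounts mounts)

-- ===== LEMMAS AND PROOFS =====

-- B's lookup table for a given key list: the fold port B performs to build `index`.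
def pvIndex (keys : List String) : PySem.Dict String Int :=
  (PySem.List.enumerate keys).foldl (fun d p => d.insert p.2 p.1) PySem.Dict.empty

-- the Option-valued step underlying B's ancestor-collecting inner loop
def pvG (keys : List String) (target : String) (p : Int × Char) : Option (Int × String) :=
  if p.2 == '/' then
    ((pvIndex keys).get? (PySem.Str.slice target none (some p.1))).map
      (fun i => (i, PySem.Str.slice target none (some p.1)))
  else none

lemma pv_items_index (keys : List String) (hnd : keys.Nodup) :
    (pvIndex keys).items = (PySem.List.enumerate keys).map (fun p => (p.2, p.1)) := by
  unfold pvIndex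
  rw [PySem.Dict.items_foldl_insert_fresh (PySem.List.enumerate keys) (fun p => p.2) (fun p => p.1)
      PySem.Dict.empty (fun a _ => PySem.Dict.contains_empty _)
      (by rw [PySem.List.map_snd_enumerate]; exact hnd)]
  simp [PySem.Dict.empty]

lemma pv_keys_index_nodup (keys : List String) (hnd : keys.Nodup) :
    (pvIndex keys).keys.Nodup := by
  have h := pv_items_index keys hnd
  have : (pvIndex keys).keys = keys := by
    show (pvIndex keys).items.map Prod.fst = keys
    rw [h, List.map_map]
    exact PySem.List.map_snd_enumerate keys 0
  rw [this]; exact hnd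

lemma pv_index_get (keys : List String) (hnd : keys.Nodup) (k : String) (i : Int) :
    (pvIndex keys).get? k = some i ↔ (i, k) ∈ PySem.List.enumerate keys 0 := by
  rw [PySem.Dict.get?_eq_some_iff_mem_items _ _ _ (pv_keys_index_nodup keys hnd),
      pv_items_index keys hnd, List.mem_map]
  constructor
  · rintro ⟨p, hp, he⟩
    have : p = (i, k) := by
      cases p; simp at he; simp [he.1, he.2]
    rwa [this] at hp
  · intro h; exact ⟨(i, k), h, rfl⟩

-- A's condition holds exactly when k is the text before one of t's '/' characters
lemma pv_condA_iff (t k : String) :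
    ((t != k) && PySem.Str.startswith t (k ++ "/")) = true ↔
      ∃ pos : Nat, pos < t.toList.length ∧ t.toList[pos]? = some '/' ∧
        k.toList = t.toList.take pos := by
  have hsl : ("/" : String).toList = ['/'] := by decide
  rw [Bool.and_eq_true, bne_iff_ne, PySem.Str.startswith_eq, PySem.Chars.startswith_iff,
      String.toList_append, hsl]
  constructor
  · rintro ⟨hne, r, hr⟩
    refine ⟨k.toList.length, ?_, ?_, ?_⟩
    · rw [← hr]; simp
    · rw [← hr, List.append_assoc, List.getElem?_append_right (by simp)]
      simp
    · rw [← hr, List.append_assoc, List.take_left]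
  · rintro ⟨pos, hlt, hget, htake⟩
    constructor
    · intro he
      have : k.toList.length = pos := by
        rw [htake, List.length_take]; omega
      rw [he] at hlt
      omega
    · have : k.toList ++ ['/'] = t.toList.take (pos + 1) := by
        rw [List.take_add_one, htake, hget]; rfl
      rw [this]; exact List.take_prefix _ _

lemma pv_toList_slice_nat (t : String) (pos : Nat) :
    (PySem.Str.slice t none (some ((pos : Int)))).toList = t.toList.take pos := by
  rw [PySem.Str.toList_slice, PySem.Chars.slice_eq_listSlice,
      PySem.List.slice_to t.toList (by positivity)]
  simp

-- B's inner loop is a filterMap over the enumerated characters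
lemma pv_hits_foldl (keys : List String) (t : String) :
    ∀ (l : List (Int × Char)) (acc : List (Int × String)),
      l.foldl (fun h p =>
          if p.2 == '/' then
            match (pvIndex keys).get? (PySem.Str.slice t none (some p.1)) with
            | some i => h ++ [(i, PySem.Str.slice t none (some p.1))]
            | none => h
          else h) acc = acc ++ l.filterMap (pvG keys t) := by
  intro l
  induction l with
  | nil => intro acc; simp
  | cons p l ih =>
    intro acc
    rw [List.foldl_cons, List.filterMap_cons, ih]
    by_cases hc : p.2 == '/'
    · simp only [hc, if_pos, pvG]
      cases hg : (pvIndex keys).get? (PySem.Str.slice t none (some p.1)) with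
      | none => simp
      | some i => simp
    · simp only [pvG, hc, if_neg, Bool.false_eq_true, not_false_iff]

lemma pv_mem_hits (keys : List String) (hnd : keys.Nodup) (t : String) (i : Int) (k : String) :
    (i, k) ∈ (PySem.List.enumerate t.toList 0).filterMap (pvG keys t) ↔
      (i, k) ∈ PySem.List.enumerate keys 0 ∧
        ((t != k) && PySem.Str.startswith t (k ++ "/")) = true := by
  rw [List.mem_filterMap]
  constructor
  · rintro ⟨p, hp, hg⟩
    rw [PySem.List.mem_enumerate_iff] at hp
    obtain ⟨pos, hlt, rfl⟩ := hp
    unfold pvG at hg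
    simp only [zero_add] at hg ⊢
    by_cases hc : t.toList[pos] == '/'
    · rw [if_pos hc] at hg
      rw [Option.map_eq_some_iff] at hg
      obtain ⟨j, hj, hjk⟩ := hg
      have hik : j = i ∧ PySem.Str.slice t none (some ((pos : Int))) = k := by
        constructor <;> [exact congrArg Prod.fst hjk; exact congrArg Prod.snd hjk]
      obtain ⟨rfl, hk⟩ := hik
      have htake : k.toList = t.toList.take pos := by
        rw [← hk, pv_toList_slice_nat]
      rw [hk] at hj
      refine ⟨(pv_index_get keys hnd k j).mp hj, (pv_condA_iff t k).mpr ?_⟩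
      exact ⟨pos, hlt, by rw [List.getElem?_eq_some_iff]; exact ⟨hlt, by simpa using hc⟩, htake⟩
    · rw [if_neg hc] at hg; exact absurd hg (by simp)
  · rintro ⟨hmem, hcond⟩
    rw [pv_condA_iff] at hcond
    obtain ⟨pos, hlt, hget, htake⟩ := hcond
    refine ⟨((pos : Int), t.toList[pos]'hlt), ?_, ?_⟩
    · rw [PySem.List.mem_enumerate_iff]
      exact ⟨pos, hlt, by simp⟩
    · unfold pvG
      have hc : t.toList[pos]'hlt = '/' := by
        rw [List.getElem?_eq_some_iff] at hget; exact hget.2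
      rw [if_pos (by simpa using hc)]
      have hk : PySem.Str.slice t none (some ((pos : Int))) = k := by
        rw [← String.toList_inj, pv_toList_slice_nat, htake]
      simp only [hk]
      rw [(pv_index_get keys hnd k i).mpr hmem]
      rfl

lemma pv_hits_nodup (keys : List String) (t : String) :
    ((PySem.List.enumerate t.toList 0).filterMap (pvG keys t)).Nodup := by
  have hpw : (PySem.List.enumerate t.toList 0).Pairwise
      (fun p q => p ∈ PySem.List.enumerate t.toList 0 ∧ q ∈ PySem.List.enumerate t.toList 0 ∧ p.1 < q.1) :=
    List.Pairwise.and_mem.mp (PySem.List.pairwise_lt_enumerate t.toList 0)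
  have hlen : ∀ p ∈ PySem.List.enumerate t.toList 0, ∀ b, pvG keys t p = some b →
      b.2.toList.length = p.1.toNat ∧ p.1.toNat < t.toList.length := by
    intro p hp b hb
    rw [PySem.List.mem_enumerate_iff] at hp
    obtain ⟨pos, hlt, rfl⟩ := hp
    unfold pvG at hb
    by_cases hc : t.toList[pos] == '/'
    · rw [if_pos (by simpa using hc)] at hb
      rw [Option.map_eq_some_iff] at hb
      obtain ⟨j, _, hjk⟩ := hb
      have : b.2 = PySem.Str.slice t none (some (0 + (pos : Int))) := by rw [← hjk]
      rw [this]
      simp only [zero_add]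
      rw [pv_toList_slice_nat, List.length_take]
      omega
    · rw [if_neg hc] at hb; exact absurd hb (by simp)
  have h2 : ((PySem.List.enumerate t.toList 0).filterMap (pvG keys t)).Pairwise
      (fun b b' => b.2.toList.length < b'.2.toList.length) := by
    refine List.Pairwise.filterMap _ ?_ hpw
    rintro a a' ⟨ha, ha', hlt⟩ b hb b' hb'
    obtain ⟨e1, e2⟩ := hlen a ha b hb
    obtain ⟨e1', e2'⟩ := hlen a' ha' b' hb'
    have h0 : 0 ≤ a.1 := by
      rw [PySem.List.mem_enumerate_iff] at ha; obtain ⟨k, _, rfl⟩ := ha; simp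
    omega
  exact h2.imp (fun h => by intro he; rw [he] at h; omega)

lemma pv_map_filter_enumerate {β : Type} (c : String → Bool) (f : String → β) :
    ∀ (xs : List String) (s : Int),
      ((PySem.List.enumerate xs s).filter (fun p => c p.2)).map (fun p => f p.2) =
        (xs.filter c).map f := by
  intro xs
  induction xs with
  | nil => intro s; simp [PySem.List.enumerate]
  | cons x xs ih =>
    intro s
    rw [PySem.List.enumerate_cons, List.filter_cons, List.filter_cons]
    by_cases hc : c x
    · simp only [hc, if_pos, List.map_cons, ih]
    · simp only [hc, Bool.false_eq_true, if_neg, not_false_iff, ih]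

lemma pv_sorted_hits (keys : List String) (hnd : keys.Nodup) (t : String) :
    PySem.List.sorted ((PySem.List.enumerate t.toList 0).filterMap (pvG keys t)) (fun h => h.1) =
      (PySem.List.enumerate keys 0).filter
        (fun p => (t != p.2) && PySem.Str.startswith t (p.2 ++ "/")) := by
  have hEpw : ((PySem.List.enumerate keys 0).filter
      (fun p => (t != p.2) && PySem.Str.startswith t (p.2 ++ "/"))).Pairwise
      (fun p q => p.1 < q.1) :=
    (PySem.List.pairwise_lt_enumerate keys 0).filter _
  apply PySem.List.sorted_eq_of_perm_of_pairwise_lt _ _ _ ?_ hEpw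
  have hEnd : ((PySem.List.enumerate keys 0).filter
      (fun p => (t != p.2) && PySem.Str.startswith t (p.2 ++ "/"))).Nodup :=
    hEpw.imp (fun h => by intro he; rw [he] at h; omega)
  rw [List.perm_ext_iff_of_nodup hEnd (pv_hits_nodup keys t)]
  rintro ⟨i, k⟩
  rw [List.mem_filter, pv_mem_hits keys hnd t i k]

lemma pv_core (keys : List String) (hnd : keys.Nodup) :
    keys.foldl (fun warnings target =>
      let warnings := keys.foldl (fun w other =>
        if target != other && PySem.Str.startswith target (other ++ "/") then
          w ++ [pvMsgInside target other]
        else w) warnings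
      if pvSystemDirs.any (fun d => PySem.Str.startswith target d) then
        warnings ++ [pvMsgSys target]
      else warnings) [] =
    keys.foldl (fun warnings target =>
      let hits := (PySem.List.enumerate target.toList).foldl (fun h p =>
        if p.2 == '/' then
          match (pvIndex keys).get? (PySem.Str.slice target none (some p.1)) with
          | some i => h ++ [(i, PySem.Str.slice target none (some p.1))]
          | none => h
        else h) []
      let hits := PySem.List.sorted hits (fun h => h.1)
      let warnings := hits.foldl (fun w h => w ++ [pvMsgInside target h.2]) warnings
      if pvSystemDirs.any (fun d => PySem.Str.startswith target d) then
        warnings ++ [pvMsgSys target]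
      else warnings) [] := by
  have hstep : (fun (warnings : List String) (target : String) =>
      let warnings := keys.foldl (fun w other =>
        if target != other && PySem.Str.startswith target (other ++ "/") then
          w ++ [pvMsgInside target other]
        else w) warnings
      if pvSystemDirs.any (fun d => PySem.Str.startswith target d) then
        warnings ++ [pvMsgSys target]
      else warnings) =
    (fun (warnings : List String) (target : String) =>
      let hits := (PySem.List.enumerate target.toList).foldl (fun h p =>
        if p.2 == '/' then
          match (pvIndex keys).get? (PySem.Str.slice target none (some p.1)) with
          | some i => h ++ [(i, PySem.Str.slice target none (some p.1))]
          | none => h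
        else h) []
      let hits := PySem.List.sorted hits (fun h => h.1)
      let warnings := hits.foldl (fun w h => w ++ [pvMsgInside target h.2]) warnings
      if pvSystemDirs.any (fun d => PySem.Str.startswith target d) then
        warnings ++ [pvMsgSys target]
      else warnings) := by
    funext w t
    show (if pvSystemDirs.any (fun d => PySem.Str.startswith t d) = true then
        (keys.foldl (fun w other =>
          if t != other && PySem.Str.startswith t (other ++ "/") then
            w ++ [pvMsgInside t other]
          else w) w) ++ [pvMsgSys t]
      else keys.foldl (fun w other =>
          if t != other && PySem.Str.startswith t (other ++ "/") then
            w ++ [pvMsgInside t other]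
          else w) w) = _
    rw [PySem.List.foldl_append_if (fun other => t != other && PySem.Str.startswith t (other ++ "/"))
        (fun other => pvMsgInside t other) keys w]
    show _ = (if pvSystemDirs.any (fun d => PySem.Str.startswith t d) = true then
        ((PySem.List.sorted ((PySem.List.enumerate t.toList 0).foldl (fun h p =>
            if p.2 == '/' then
              match (pvIndex keys).get? (PySem.Str.slice t none (some p.1)) with
              | some i => h ++ [(i, PySem.Str.slice t none (some p.1))]
              | none => h
            else h) []) (fun h => h.1)).foldl (fun w h => w ++ [pvMsgInside t h.2]) w) ++ [pvMsgSys t]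
      else (PySem.List.sorted ((PySem.List.enumerate t.toList 0).foldl (fun h p =>
            if p.2 == '/' then
              match (pvIndex keys).get? (PySem.Str.slice t none (some p.1)) with
              | some i => h ++ [(i, PySem.Str.slice t none (some p.1))]
              | none => h
            else h) []) (fun h => h.1)).foldl (fun w h => w ++ [pvMsgInside t h.2]) w)
    rw [pv_hits_foldl keys t, List.nil_append, pv_sorted_hits keys hnd t,
        PySem.List.foldl_append_singleton_eq_map (fun (h : Int × String) => pvMsgInside t h.2),
        pv_map_filter_enumerate (fun other => t != other && PySem.Str.startswith t (other ++ "/"))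
          (fun other => pvMsgInside t other) keys 0]
  rw [hstep]

theorem pv_main (mounts : List (String × String)) :
    validate_mounts mounts = validate_mounts_alt mounts :=
  pv_core (PySem.Set.ofList (mounts.map Prod.fst)) (PySem.Set.nodup_ofList _)

-- ===== VERDICT (by name: the statement is the Claim_ definition above) =====
theorem validate_mounts_spec : Claim_equal_validate_mounts := by
  intro mounts _
  unfold Spec_validate_mounts
  exact pv_main mounts
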